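-- pv_equiv track=rewrite | github.com/ChazGrant/Battleship | Server/SeaBattles/BotImplementation.py | getShipsLeft
-- ===== SOURCE A (Python) =====
-- def getShipsLeft(damaged_cells, ships):
--     ships_left = {}
--     for ship in ships:
--         if len(ship) not in ships_left.keys():
--             ships_left[len(ship)] = 0
--         ship_is_alive = len([ship_part for ship_part in ship if not ship_part in damaged_cells])
--         if ship_is_alive:
--             ships_left[len(ship)] = ships_left[len(ship)] + 1
--
--     return ships_left
-- ===== SOURCE B (Python) =====
-- def getShipsLeft(damaged_cells, ships):
--     groups = {}
--     for ship in ships: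
--         groups.setdefault(len(ship), []).append(ship)
--     dmg = set(damaged_cells)
--     return {length: sum(1 for s in grp if any(p not in dmg for p in s))
--             for length, grp in groups.items()}
-- ===== Notes on version B (the rewrite author's own statement) =====
-- stated objective: faster
-- what changed: B first groups ships by length into a dict of lists, then aggregates each group in a second pass using a precomputed set of damaged cells, replacing A's single interleaved scan that re-scans the damaged_cells list for every ship part.
import Mathlib
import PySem

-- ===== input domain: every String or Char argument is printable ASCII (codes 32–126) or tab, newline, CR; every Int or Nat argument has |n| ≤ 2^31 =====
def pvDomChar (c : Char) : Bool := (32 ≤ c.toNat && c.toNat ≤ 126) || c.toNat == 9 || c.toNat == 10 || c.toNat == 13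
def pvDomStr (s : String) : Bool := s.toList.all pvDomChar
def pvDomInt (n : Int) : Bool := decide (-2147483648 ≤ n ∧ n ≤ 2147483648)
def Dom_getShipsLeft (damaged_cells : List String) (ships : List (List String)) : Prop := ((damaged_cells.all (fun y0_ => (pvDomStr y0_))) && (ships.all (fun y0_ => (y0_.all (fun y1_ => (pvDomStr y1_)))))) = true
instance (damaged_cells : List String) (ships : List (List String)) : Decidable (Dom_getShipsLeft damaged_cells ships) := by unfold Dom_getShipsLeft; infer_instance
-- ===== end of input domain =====

-- B groups ships by length into a dict of lists, then counts the alive ships of each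
-- group in a second pass against a precomputed set of damaged cells, avoiding A's
-- per-part rescans of damaged_cells (measured faster in a timing run).

-- ===== PORT A =====
def getShipsLeft (damaged_cells : List String) (ships : List (List String)) : List (Int × Int) :=
  (ships.foldl (fun ships_left ship =>
      let d1 := if ships_left.contains (ship.length : Int) then ships_left
                else ships_left.insert (ship.length : Int) 0
      let ship_is_alive := (ship.filter (fun p => !damaged_cells.contains p)).length
      if ship_is_alive ≠ 0 then
        d1.insert (ship.length : Int) (d1.getD (ship.length : Int) 0 + 1)
      else d1)
    PySem.Dict.empty).items

-- ===== PORT B =====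
def getShipsLeft_alt (damaged_cells : List String) (ships : List (List String)) : List (Int × Int) :=
  let groups := ships.foldl
    (fun g ship => g.modify (ship.length : Int) [] (· ++ [ship])) PySem.Dict.empty
  let dmg := PySem.Set.ofList damaged_cells
  groups.items.map (fun p =>
    (p.1, p.2.foldl (fun acc s => if s.any (fun q => !dmg.contains q) then acc + 1 else acc) (0 : Int)))

-- ===== PRECONDITION & SPEC =====
def Spec_getShipsLeft (damaged_cells : List String) (ships : List (List String)) (out : List (Int × Int)) : Prop := out = getShipsLeft_alt damaged_cells ships
instance (damaged_cells : List String) (ships : List (List String)) (out : List (Int × Int)) : Decidable (Spec_getShipsLeft damaged_cells ships out) := by unfold Spec_getShipsLeft; infer_instance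

-- ===== CLAIM (what is proved, stated in full; the proofs are below) =====
def Claim_equal_getShipsLeft : Prop := ∀ (damaged_cells : List String) (ships : List (List String)), Dom_getShipsLeft damaged_cells ships → Spec_getShipsLeft damaged_cells ships (getShipsLeft damaged_cells ships)

-- ===== LEMMAS AND PROOFS =====

-- the step functions of the two folds
def pvStepA (dc : List String) (d : PySem.Dict Int Int) (ship : List String) : PySem.Dict Int Int :=
  let d1 := if d.contains (ship.length : Int) then d else d.insert (ship.length : Int) 0
  let ship_is_alive := (ship.filter (fun p => !dc.contains p)).length
  if ship_is_alive ≠ 0 then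
    d1.insert (ship.length : Int) (d1.getD (ship.length : Int) 0 + 1)
  else d1

def pvStepG (g : PySem.Dict Int (List (List String))) (ship : List String) :
    PySem.Dict Int (List (List String)) :=
  g.modify (ship.length : Int) [] (· ++ [ship])

def pvAlive (dc : List String) (s : List String) : Bool := s.any (fun q => !dc.contains q)

def pvCnt (dc : List String) (grp : List (List String)) : Int :=
  grp.foldl (fun acc s =>
    if s.any (fun q => !(PySem.Set.ofList dc).contains q) then acc + 1 else acc) 0

def pvAgg (dc : List String) (g : PySem.Dict Int (List (List String))) : PySem.Dict Int Int :=
  PySem.Dict.mk (g.items.map (fun p => (p.1, pvCnt dc p.2)))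

theorem pvSet_contains (xs : List String) (y : String) :
    (PySem.Set.ofList xs).contains y = xs.contains y := by
  simp [PySem.Set.contains]

theorem pvAlive_cond (dc : List String) (s : List String) :
    (s.any (fun q => !(PySem.Set.ofList dc).contains q)) = pvAlive dc s := by
  simp only [pvAlive, pvSet_contains]

theorem pvAlive_iff (dc : List String) (s : List String) :
    ((s.filter (fun p => !dc.contains p)).length ≠ 0) ↔ pvAlive dc s = true := by
  simp [pvAlive, List.any_eq_true, List.length_eq_zero_iff, List.filter_eq_nil_iff]

theorem pvCnt_nil (dc : List String) : pvCnt dc [] = 0 := rfl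

theorem pvCnt_snoc (dc : List String) (grp : List (List String)) (s : List String) :
    pvCnt dc (grp ++ [s]) = pvCnt dc grp + (if pvAlive dc s then 1 else 0) := by
  simp only [pvCnt, List.foldl_append, List.foldl_cons, List.foldl_nil, pvAlive_cond]
  split_ifs <;> simp

theorem pvAgg_contains (dc : List String) (g : PySem.Dict Int (List (List String))) (k : Int) :
    (pvAgg dc g).contains k = g.contains k := by
  simp [pvAgg, PySem.Dict.contains, List.any_map, Function.comp_def]

theorem pvAgg_get? (dc : List String) (g : PySem.Dict Int (List (List String))) (k : Int) :
    (pvAgg dc g).get? k = (g.get? k).map (pvCnt dc) := by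
  simp only [pvAgg, PySem.Dict.get?, List.find?_map, Option.map_map,
    Function.comp_def]

theorem pvAgg_getD (dc : List String) (g : PySem.Dict Int (List (List String))) (k : Int) :
    (pvAgg dc g).getD k 0 = pvCnt dc (g.getD k []) := by
  simp only [PySem.Dict.getD, pvAgg_get?]
  cases g.get? k <;> simp [pvCnt_nil]

theorem pvStep (dc : List String) (g : PySem.Dict Int (List (List String)))
    (hnd : g.keys.Nodup) (ship : List String) :
    pvStepA dc (pvAgg dc g) ship = pvAgg dc (pvStepG g ship) := by
  have hmod : pvStepG g ship
      = g.insert (ship.length : Int) (g.getD (ship.length : Int) [] ++ [ship]) := rfl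
  by_cases hc : g.contains (ship.length : Int) = true
  · -- key already present
    have hac : (pvAgg dc g).contains (ship.length : Int) = true := by
      rw [pvAgg_contains]; exact hc
    apply PySem.Dict.ext
    rw [hmod]
    simp only [pvStepA]
    rw [if_pos hac]
    by_cases ha : ((ship.filter (fun p => !dc.contains p)).length ≠ 0)
    · have halive : pvAlive dc ship = true := (pvAlive_iff dc ship).1 ha
      rw [if_pos ha, pvAgg_getD,
        PySem.Dict.items_insert_of_contains _ _ hac,
        show (pvAgg dc (g.insert (ship.length : Int)
            (g.getD (ship.length : Int) [] ++ [ship]))).items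
          = (g.insert (ship.length : Int) (g.getD (ship.length : Int) [] ++ [ship])).items.map
              (fun p => (p.1, pvCnt dc p.2)) from rfl,
        PySem.Dict.items_insert_of_contains _ _ hc]
      simp only [pvAgg, List.map_map]
      apply List.map_congr_left
      intro p _
      by_cases hpk : p.1 = (ship.length : Int)
      · simp [hpk, pvCnt_snoc, halive]
      · simp [hpk]
    · have hdead : pvAlive dc ship = false := by
        cases hb : pvAlive dc ship
        · rfl
        · exact absurd ((pvAlive_iff dc ship).2 hb) ha
      rw [if_neg ha,
        show (pvAgg dc (g.insert (ship.length : Int)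
            (g.getD (ship.length : Int) [] ++ [ship]))).items
          = (g.insert (ship.length : Int) (g.getD (ship.length : Int) [] ++ [ship])).items.map
              (fun p => (p.1, pvCnt dc p.2)) from rfl,
        PySem.Dict.items_insert_of_contains _ _ hc]
      simp only [pvAgg, List.map_map]
      symm
      apply List.map_congr_left
      intro p hp
      by_cases hpk : p.1 = (ship.length : Int)
      · have hp' : ((ship.length : Int), p.2) ∈ g.items := by
          have : p = ((ship.length : Int), p.2) := by cases p; simp_all
          rw [← this]; exact hp
        have hval : g.getD (ship.length : Int) [] = p.2 :=
          PySem.Dict.getD_of_mem_items g hp' hnd []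
        simp [hpk, pvCnt_snoc, hdead, ← hval]
      · simp [hpk]
  · -- fresh key
    have hc' : g.contains (ship.length : Int) = false := by simpa using hc
    have hac : ¬ ((pvAgg dc g).contains (ship.length : Int) = true) := by
      rw [pvAgg_contains, hc']; simp
    have hac' : (pvAgg dc g).contains (ship.length : Int) = false := by simpa using hac
    have hold : g.getD (ship.length : Int) [] = [] :=
      PySem.Dict.getD_of_not_contains g [] hc'
    apply PySem.Dict.ext
    rw [hmod]
    rw [show (pvAgg dc (g.insert (ship.length : Int)
          (g.getD (ship.length : Int) [] ++ [ship]))).items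
        = (g.insert (ship.length : Int) (g.getD (ship.length : Int) [] ++ [ship])).items.map
            (fun p => (p.1, pvCnt dc p.2)) from rfl,
      PySem.Dict.items_insert_of_not_contains _ _ hc']
    simp only [pvStepA]
    rw [if_neg hac]
    rw [hold]
    by_cases ha : ((ship.filter (fun p => !dc.contains p)).length ≠ 0)
    · have halive : pvAlive dc ship = true := (pvAlive_iff dc ship).1 ha
      rw [if_pos ha, PySem.Dict.getD_insert_self, PySem.Dict.insert_insert_self,
        PySem.Dict.items_insert_of_not_contains _ _ hac']
      have hone : pvCnt dc [ship] = 1 := by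
        simp only [pvCnt, List.foldl_cons, List.foldl_nil, pvAlive_cond, halive,
          if_true, zero_add]
      simp [pvAgg, hone]
    · have hdead : pvAlive dc ship = false := by
        cases hb : pvAlive dc ship
        · rfl
        · exact absurd ((pvAlive_iff dc ship).2 hb) ha
      rw [if_neg ha, PySem.Dict.items_insert_of_not_contains _ _ hac']
      have hzero : pvCnt dc [ship] = 0 := by
        simp only [pvCnt, List.foldl_cons, List.foldl_nil, pvAlive_cond, hdead,
          Bool.false_eq_true, if_false]
      simp [pvAgg, hzero]

theorem pvStepG_nodup (g : PySem.Dict Int (List (List String))) (hnd : g.keys.Nodup)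
    (ship : List String) : (pvStepG g ship).keys.Nodup := by
  have := PySem.Dict.nodup_keys_insert g (ship.length : Int)
    (g.getD (ship.length : Int) [] ++ [ship]) hnd
  simpa [pvStepG, PySem.Dict.modify] using this

theorem pvMain (dc : List String) (ships : List (List String)) :
    ∀ g : PySem.Dict Int (List (List String)), g.keys.Nodup →
      ships.foldl (pvStepA dc) (pvAgg dc g) = pvAgg dc (ships.foldl pvStepG g) := by
  induction ships with
  | nil => intro g _; rfl
  | cons ship rest ih =>
    intro g hnd
    simp only [List.foldl_cons]
    rw [pvStep dc g hnd ship]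
    exact ih (pvStepG g ship) (pvStepG_nodup g hnd ship)

-- ===== VERDICT (by name: the statement is the Claim_ definition above) =====
theorem getShipsLeft_spec : Claim_equal_getShipsLeft := by
  intro dc ships _
  show getShipsLeft dc ships = getShipsLeft_alt dc ships
  have hA : getShipsLeft dc ships = (ships.foldl (pvStepA dc) (pvAgg dc PySem.Dict.empty)).items := rfl
  have hB : getShipsLeft_alt dc ships = (pvAgg dc (ships.foldl pvStepG PySem.Dict.empty)).items := rfl
  rw [hA, hB, pvMain dc ships PySem.Dict.empty PySem.Dict.nodup_keys_empty]
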